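-- pv_equiv track=rewrite | github.com/Plasmath/noble-tools-revised | faceting.py | IsCompound
-- ===== SOURCE A (Python) =====
-- def IsCompound(faces):
--     numFaces = len(faces)
--
--     #Construct a graph where each vertex corresponds to a face,
--     #and two vertices are connected if their faces are adjacent.
--     adj = {i:{j for j in range(numFaces) if len(set(faces[i]).intersection(set(faces[j]))) == 2} for i in range(numFaces)}
--
--
--     #The polyhedron is a compound if and only if this graph is disconnected.
--     connectedComponent = {0}
--     for i in range(numFaces):
--         newConnectedComponent = connectedComponent.copy()
--         for j in connectedComponent:
--             newConnectedComponent = newConnectedComponent.union(adj[j])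
--         if newConnectedComponent == connectedComponent:
--             break
--         connectedComponent = newConnectedComponent
--     return len(connectedComponent) != numFaces
-- ===== SOURCE B (Python) =====
-- def IsCompound(faces):
--     numFaces = len(faces)
--
--     # Vertex sets of each face, computed once.
--     vsets = [set(f) for f in faces]
--
--     # Index faces by vertex incidence: vertex -> list of faces containing it.
--     incidence = {}
--     for i, vs in enumerate(vsets):
--         for v in vs:
--             incidence.setdefault(v, []).append(i)
--
--     # Adjacency lists: count, per face, how many vertices it shares with each
--     # face met through the incidence index; adjacent = exactly two shared.
--     # No pairwise set intersections, and faces sharing no vertex never meet.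
--     adj = {}
--     for i, vs in enumerate(vsets):
--         counts = {}
--         for v in vs:
--             for j in incidence[v]:
--                 counts[j] = counts.get(j, 0) + 1
--         adj[i] = [j for j, c in counts.items() if c == 2]
--
--     # Single depth-first search from face 0; compound iff not everything is reached.
--     visited = set()
--     stack = [0]
--     while stack:
--         v = stack.pop()
--         if v in visited:
--             continue
--         visited.add(v)
--         stack.extend(adj.get(v, []))
--     return len(visited) != numFaces
-- ===== Notes on version B (the rewrite author's own statement) =====
-- stated objective: faster
-- what changed: B indexes faces by vertex incidence and counts shared vertices per face pair through that index (A's all-pairs set-intersection scan disappears), then replaces the repeated whole-component saturation rounds with a single stack-based DFS from face 0.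
import Mathlib
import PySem

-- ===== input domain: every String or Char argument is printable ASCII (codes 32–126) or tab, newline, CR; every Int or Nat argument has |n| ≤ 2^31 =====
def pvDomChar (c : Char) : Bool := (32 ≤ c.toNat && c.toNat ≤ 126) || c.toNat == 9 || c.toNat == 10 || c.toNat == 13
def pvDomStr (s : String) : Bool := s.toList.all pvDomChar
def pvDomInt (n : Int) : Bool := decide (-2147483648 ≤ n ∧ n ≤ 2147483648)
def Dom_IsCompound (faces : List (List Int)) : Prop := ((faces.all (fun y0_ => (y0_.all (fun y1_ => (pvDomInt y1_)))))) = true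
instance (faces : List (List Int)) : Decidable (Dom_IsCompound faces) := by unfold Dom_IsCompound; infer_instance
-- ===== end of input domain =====

-- B builds adjacency by counting shared vertices through a vertex→faces incidence index
-- (no all-pairs set intersections) and runs a single stack-based DFS instead of A's
-- repeated whole-component saturation; measurably faster on the timed inputs.

-- ===== PORT A =====

-- len(set(a).intersection(set(b))) — the intersection-size test both Pythons spell out
def pvInterLen (a b : List Int) : Int :=
  PySem.Set.len (PySem.Set.inter (PySem.Set.ofList a) (PySem.Set.ofList b))

-- adj = {i: {j for j in range(numFaces) if len(set(faces[i]) & set(faces[j])) == 2} for i in range(numFaces)}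
-- faces[i]/faces[j] have i, j drawn from range(len(faces)), so pyGetD is exact
def pvAdjA (faces : List (List Int)) : PySem.Dict Int (PySem.Set Int) :=
  (PySem.List.pyRange 0 (PySem.List.len faces)).foldl
    (fun d i => d.insert i (PySem.Set.ofList
      ((PySem.List.pyRange 0 (PySem.List.len faces)).filter
        (fun j => pvInterLen (PySem.List.pyGetD faces i []) (PySem.List.pyGetD faces j []) == 2))))
    PySem.Dict.empty

-- the 'for i in range(numFaces)' saturation loop with its 'break';
-- 'for j in connectedComponent' iterates a Python set: the set built from it and the final
-- length are iteration-order independent, so the stored order is a sound model here;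
-- adj[j] never raises on an executed iteration (every member of the component is a key in
-- range(numFaces)), so getD with a dummy default is exact
def pvLoopA (adj : PySem.Dict Int (PySem.Set Int)) : List Int → PySem.Set Int → PySem.Set Int
  | [], cc => cc
  | _ :: rest, cc =>
    let ncc := cc.foldl (fun acc j => PySem.Set.union acc (adj.getD j PySem.Set.empty)) cc
    if PySem.Set.equal ncc cc then cc else pvLoopA adj rest ncc

def IsCompound (faces : List (List Int)) : Bool :=
  let numFaces := PySem.List.len faces
  let adj := pvAdjA faces
  let cc := pvLoopA adj (PySem.List.pyRange 0 numFaces) (PySem.Set.ofList [0])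
  decide (PySem.Set.len cc ≠ numFaces)

-- ===== PORT B =====

-- incidence: for i, vs in enumerate(vsets): for v in vs: incidence.setdefault(v, []).append(i)
-- (iterating the set vs: the dict's lists' contents per key are order independent up to the
--  DFS's final visited set, which is all the output reads)
def pvIncidence (vsets : List (PySem.Set Int)) : PySem.Dict Int (List Int) :=
  (PySem.List.enumerate vsets).foldl
    (fun d p => p.2.foldl (fun d v => d.modify v [] (fun l => l ++ [p.1])) d)
    PySem.Dict.empty

-- counts = {}; for v in vs: for j in incidence[v]: counts[j] = counts.get(j, 0) + 1
-- adj[i] = [j for j, c in counts.items() if c == 2]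
-- (incidence[v] exists since v ∈ vs was indexed, so getD is exact; the Python temporary
--  'counts' is inlined into the value inserted for i)
def pvAdjB (vsets : List (PySem.Set Int)) (inc : PySem.Dict Int (List Int)) :
    PySem.Dict Int (List Int) :=
  (PySem.List.enumerate vsets).foldl
    (fun d p => d.insert p.1
      ((((p.2.foldl (fun c v => (inc.getD v []).foldl
            (fun c j => c.insert j (c.getD j 0 + 1)) c)
          (PySem.Dict.empty : PySem.Dict Int Int))).items.filter
        (fun q => q.2 == 2)).map (fun q => q.1)))
    PySem.Dict.empty

-- two facts the DFS below cites for termination / its stack invariant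
theorem pv_length_filter_lt {α : Type} (l : List α) (p q : α → Bool)
    (h : ∀ x, q x = true → p x = true) (v : α) (hv : v ∈ l)
    (hp : p v = true) (hq : q v = false) :
    (l.filter q).length < (l.filter p).length := by
  induction l with
  | nil => cases hv
  | cons a tl ih =>
    rcases List.mem_cons.mp hv with rfl | hv'
    · have hle : (tl.filter q).length ≤ (tl.filter p).length :=
        (List.monotone_filter_right tl h).length_le
      simp [hp, hq]
      omega
    · by_cases hqa : q a = true
      · simp [hqa, h a hqa]
        exact ih hv'
      · have := ih hv'
        by_cases hpa : p a = true <;> simp_all <;> omega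

theorem pv_mem_values_flatten_of_getD (d : PySem.Dict Int (List Int)) (v x : Int)
    (hx : x ∈ d.getD v []) : x ∈ d.values.flatten := by
  rcases hg : d.get? v with _ | l
  · rw [PySem.Dict.getD_eq_get?_getD, hg] at hx; cases hx
  · rw [PySem.Dict.getD_eq_get?_getD, hg] at hx
    have hmem := PySem.Dict.mem_items_of_get?_eq_some d hg
    refine List.mem_flatten.mpr ⟨l, ?_, hx⟩
    simp only [PySem.Dict.values]
    exact List.mem_map.mpr ⟨(v, l), hmem, rfl⟩

-- while stack: v = stack.pop(); if v in visited: continue; visited.add(v); stack.extend(adj.get(v, []))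
-- (top of stack at the list head; the final visited set does not depend on traversal order;
--  U and the two proof arguments only serve the termination measure)
def pvDfs (adj : PySem.Dict Int (List Int)) (U : List Int)
    (hadj : ∀ v x, x ∈ adj.getD v [] → x ∈ U)
    (visited : PySem.Set Int) (stack : List Int)
    (hs : ∀ x ∈ stack, x ∈ U) : PySem.Set Int :=
  match stack with
  | [] => visited
  | v :: rest =>
    if hv : PySem.Set.contains visited v = true then
      pvDfs adj U hadj visited rest (fun x hx => hs x (List.mem_cons_of_mem _ hx))
    else
      pvDfs adj U hadj (PySem.Set.add visited v) (adj.getD v [] ++ rest)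
        (fun x hx => (List.mem_append.mp hx).elim (hadj v x)
          (fun hr => hs x (List.mem_cons_of_mem _ hr)))
termination_by ((U.filter (fun x => !(PySem.Set.contains visited x))).length, stack.length)
decreasing_by
  · exact Prod.Lex.right _ (by simp)
  · apply Prod.Lex.left
    refine pv_length_filter_lt U _ _ (fun x hx => ?_) v (hs v List.mem_cons_self) ?_ ?_
    · simp only [Bool.not_eq_true'] at *
      rw [← Bool.not_eq_true] at *
      intro hc
      exact hx (by simp [PySem.Set.mem_add] at *; tauto)
    · simp only [Bool.not_eq_true']; exact Bool.not_eq_true _ ▸ (by simpa using hv)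
    · have : v ∈ PySem.Set.add visited v := (PySem.Set.mem_add visited v v).mpr (Or.inr rfl)
      simp [this]

def IsCompound_alt (faces : List (List Int)) : Bool :=
  let numFaces := PySem.List.len faces
  let vsets := faces.map (fun f => PySem.Set.ofList f)
  let adj := pvAdjB vsets (pvIncidence vsets)
  let visited := pvDfs adj (0 :: adj.values.flatten)
    (fun v x hx => List.mem_cons_of_mem _ (pv_mem_values_flatten_of_getD adj v x hx))
    PySem.Set.empty [0] (fun x hx => by simp at hx; simp [hx])
  decide (PySem.Set.len visited ≠ numFaces)

-- ===== PRECONDITION & SPEC =====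
def Spec_IsCompound (faces : List (List Int)) (out : Bool) : Prop := out = IsCompound_alt faces
instance (faces : List (List Int)) (out : Bool) : Decidable (Spec_IsCompound faces out) := by unfold Spec_IsCompound; infer_instance

-- ===== CLAIM (what is proved, stated in full; the proofs are below) =====
def Claim_equal_IsCompound : Prop := ∀ (faces : List (List Int)), Dom_IsCompound faces → Spec_IsCompound faces (IsCompound faces)

-- ===== LEMMAS AND PROOFS =====

-- the face-adjacency relation both programs compute: both indices in range and the two
-- faces' vertex sets intersect in exactly two vertices
def pvE (faces : List (List Int)) (i j : Int) : Prop :=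
  (0 ≤ i ∧ i < PySem.List.len faces) ∧ (0 ≤ j ∧ j < PySem.List.len faces) ∧
  pvInterLen (PySem.List.pyGetD faces i []) (PySem.List.pyGetD faces j []) = 2

def pvReach (faces : List (List Int)) (z : Int) : Prop :=
  Relation.ReflTransGen (pvE faces) 0 z

theorem pv_getD_foldl_insert {β : Type} (l : List Int) (f : Int → β)
    (d : PySem.Dict Int β) (k : Int) (dflt : β) :
    (l.foldl (fun d i => d.insert i (f i)) d).getD k dflt =
      if k ∈ l then f k else d.getD k dflt := by
  induction l generalizing d with
  | nil => simp
  | cons a tl ih =>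
    rw [List.foldl_cons, ih]
    by_cases hk : k ∈ tl
    · simp [hk]
    · by_cases hka : k = a <;> simp [hk, hka, PySem.Dict.getD_insert]

theorem pv_mem_adjA (faces : List (List Int)) (i j : Int) :
    j ∈ (pvAdjA faces).getD i PySem.Set.empty ↔ pvE faces i j := by
  unfold pvAdjA pvE
  rw [pv_getD_foldl_insert]
  by_cases hi : i ∈ PySem.List.pyRange 0 (PySem.List.len faces)
  · rw [if_pos hi]
    rw [PySem.List.mem_pyRange_one] at hi
    simp [PySem.Set.mem_ofList, List.mem_filter, PySem.List.mem_pyRange_one, hi]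
    tauto
  · rw [if_neg hi]
    rw [PySem.List.mem_pyRange_one] at hi
    rw [PySem.Dict.getD_empty]
    constructor
    · intro h; exact absurd h (by simp [PySem.Set.empty])
    · rintro ⟨h1, -, -⟩; exact absurd h1 hi

theorem pv_incidence_eq (vsets : List (PySem.Set Int)) :
    pvIncidence vsets =
      (((PySem.List.enumerate vsets).map (fun p => p.2.map (fun w => (w, p.1)))).flatten).foldl
        (fun d q => d.modify q.1 [] (fun l => l ++ [q.2])) PySem.Dict.empty := by
  unfold pvIncidence
  rw [List.foldl_flatten, List.foldl_map]
  congr 1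
  funext d p
  rw [List.foldl_map]

theorem pv_block (s : List Int) (a v : Int) (hs : s.Nodup) :
    ((s.map (fun w => (w, a))).filter (fun p => p.1 == v)).map (fun p => p.2)
      = if v ∈ s then [a] else [] := by
  induction s with
  | nil => simp
  | cons w ws ih =>
    rcases List.nodup_cons.mp hs with ⟨hw, hws⟩
    simp only [List.map_cons, List.filter_cons]
    by_cases hwv : w = v
    · subst hwv
      simp [ih hws, hw]
    · have hb : ((w, a).1 == v) = false := by simp [hwv]
      rw [hb]
      simp only [Bool.false_eq_true, if_false]
      rw [ih hws]
      simp [List.mem_cons, Ne.symm hwv]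

theorem pv_blocks (l : List Int) (g : Int → List Int) (v : Int)
    (hnd : ∀ a, (g a).Nodup) :
    (((l.map (fun a => (g a).map (fun w => (w, a)))).flatten.filter
        (fun p => p.1 == v)).map (fun p => p.2))
      = l.filter (fun a => decide (v ∈ g a)) := by
  induction l with
  | nil => simp
  | cons a tl ih =>
    simp only [List.map_cons, List.flatten_cons, List.filter_append, List.map_append, ih,
               List.filter_cons]
    rw [pv_block (g a) a v (hnd a)]
    by_cases h : v ∈ g a <;> simp [h]

theorem pv_inc_eq (vsets : List (PySem.Set Int)) (v : Int)
    (hnd : ∀ a : Int, (PySem.List.pyGetD vsets a ([] : List Int)).Nodup) :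
    (pvIncidence vsets).getD v [] =
      (PySem.List.pyRange 0 (PySem.List.len vsets)).filter
        (fun a => decide (v ∈ PySem.List.pyGetD vsets a ([] : List Int))) := by
  rw [pv_incidence_eq, PySem.Dict.getD_foldl_modify_append, PySem.Dict.getD_empty,
      PySem.List.enumerate_eq_map_pyRange vsets [], List.nil_append, List.map_map]
  exact pv_blocks _ _ v hnd

theorem pv_counts_eq (inc : PySem.Dict Int (List Int)) (vs : List Int) :
    vs.foldl (fun c v => (inc.getD v []).foldl (fun c j => c.insert j (c.getD j 0 + 1)) c)
        (PySem.Dict.empty : PySem.Dict Int Int)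
      = PySem.Dict.counter (vs.flatMap (fun v => inc.getD v [])) := by
  rw [← PySem.Dict.foldl_insert_getD_add_one_eq_counter, List.flatMap_def,
      List.foldl_flatten, List.foldl_map]

theorem pv_sum_ite (l : List Int) (p : Int → Prop) [DecidablePred p] :
    (l.map (fun v => if p v then 1 else 0)).sum = (l.filter (fun v => decide (p v))).length := by
  induction l with
  | nil => simp
  | cons a tl ih =>
    by_cases h : p a <;> simp [h, ih] <;> omega

theorem pv_getD_adjB (vsets : List (PySem.Set Int)) (inc : PySem.Dict Int (List Int)) (i : Int) :
    (pvAdjB vsets inc).getD i [] =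
      if i ∈ PySem.List.pyRange 0 (PySem.List.len vsets) then
        (((PySem.Dict.counter ((PySem.List.pyGetD vsets i []).flatMap
            (fun v => inc.getD v []))).items.filter
          (fun q => q.2 == 2)).map (fun q => q.1))
      else [] := by
  unfold pvAdjB
  rw [PySem.List.enumerate_eq_map_pyRange vsets [], List.foldl_map]
  rw [pv_getD_foldl_insert (f := fun a =>
    ((((PySem.List.pyGetD vsets a []).foldl (fun c v => (inc.getD v []).foldl
          (fun c j => c.insert j (c.getD j 0 + 1)) c)
        (PySem.Dict.empty : PySem.Dict Int Int))).items.filter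
      (fun q => q.2 == 2)).map (fun q => q.1))]
  split
  · rw [pv_counts_eq]
  · exact PySem.Dict.getD_empty ..

theorem pv_mem_adjB (faces : List (List Int)) (i j : Int) :
    j ∈ (pvAdjB (faces.map (fun f => PySem.Set.ofList f))
          (pvIncidence (faces.map (fun f => PySem.Set.ofList f)))).getD i [] ↔
      pvE faces i j := by
  set VS := faces.map (fun f => PySem.Set.ofList f) with hVS
  have hlen : PySem.List.len VS = PySem.List.len faces := by
    simp [hVS, PySem.List.len]
  have hget : ∀ k : Int, PySem.List.pyGetD VS k ([] : List Int)
      = PySem.Set.ofList (PySem.List.pyGetD faces k []) :=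
    fun k => PySem.List.pyGetD_map (f := fun f => PySem.Set.ofList f) (d := []) ..
  have hnd : ∀ a : Int, (PySem.List.pyGetD VS a ([] : List Int)).Nodup := by
    intro a; rw [hget a]; exact PySem.Set.nodup_ofList _
  have hIncEq : ∀ v : Int, (pvIncidence VS).getD v [] =
      (PySem.List.pyRange 0 (PySem.List.len faces)).filter
        (fun a => decide (v ∈ PySem.List.pyGetD VS a ([] : List Int))) := by
    intro v; rw [pv_inc_eq VS v hnd, hlen]
  have hfil : (PySem.List.pyGetD VS i []).filter
        (fun v => decide (v ∈ PySem.List.pyGetD VS j ([] : List Int)))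
      = PySem.Set.inter (PySem.Set.ofList (PySem.List.pyGetD faces i []))
          (PySem.Set.ofList (PySem.List.pyGetD faces j [])) := by
    rw [hget i, ← hget j]
    exact List.filter_congr (fun x hx => by simp)
  rw [pv_getD_adjB, hlen]
  by_cases hi : i ∈ PySem.List.pyRange 0 (PySem.List.len faces)
  · rw [if_pos hi]
    rcases PySem.List.mem_pyRange_one.mp hi with ⟨h0, h1⟩
    rw [PySem.Dict.items_counter]
    have hcnt1 : ∀ v : Int, (((PySem.List.pyRange 0 (PySem.List.len faces)).filter
          (fun a => decide (v ∈ PySem.List.pyGetD VS a ([] : List Int)))).count j)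
        = if j ∈ PySem.List.pyRange 0 (PySem.List.len faces) ∧
            v ∈ PySem.List.pyGetD VS j ([] : List Int) then 1 else 0 := by
      intro v
      by_cases hj : j ∈ PySem.List.pyRange 0 (PySem.List.len faces) ∧
          v ∈ PySem.List.pyGetD VS j ([] : List Int)
      · rw [if_pos hj]
        exact List.count_eq_one_of_mem ((PySem.List.nodup_pyRange_one 0 _).filter _)
          (List.mem_filter.mpr ⟨hj.1, by simp [hj.2]⟩)
      · rw [if_neg hj]
        refine List.count_eq_zero.mpr (fun hmem => hj ?_)
        rcases List.mem_filter.mp hmem with ⟨hm1, hm2⟩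
        exact ⟨hm1, by simpa using hm2⟩
    have hcountL : ((PySem.List.pyGetD VS i []).flatMap
          (fun v => (pvIncidence VS).getD v [])).count j
        = if j ∈ PySem.List.pyRange 0 (PySem.List.len faces) then
            ((PySem.List.pyGetD VS i []).filter
              (fun v => decide (v ∈ PySem.List.pyGetD VS j ([] : List Int)))).length
          else 0 := by
      rw [List.count_flatMap]
      have hmc : (PySem.List.pyGetD VS i []).map
            (List.count j ∘ fun v => (pvIncidence VS).getD v [])
          = (PySem.List.pyGetD VS i []).map (fun v =>
              if j ∈ PySem.List.pyRange 0 (PySem.List.len faces) ∧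
                v ∈ PySem.List.pyGetD VS j ([] : List Int) then 1 else 0) :=
        List.map_congr_left (fun v _ => by
          simp only [Function.comp_apply, hIncEq v, hcnt1 v])
      rw [hmc]
      by_cases hjr : j ∈ PySem.List.pyRange 0 (PySem.List.len faces)
      · rw [if_pos hjr]
        simp only [hjr, true_and]
        exact pv_sum_ite (PySem.List.pyGetD VS i [])
          (fun v => v ∈ PySem.List.pyGetD VS j ([] : List Int))
      · rw [if_neg hjr]
        rw [PySem.List.mem_pyRange_one] at hjr
        simp only [PySem.List.len] at hjr
        simp [hjr]
    constructor
    · intro hj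
      simp only [List.mem_map, List.mem_filter, beq_iff_eq] at hj
      obtain ⟨q, ⟨hq1, hq2⟩, rfl⟩ := hj
      obtain ⟨k, hk, rfl⟩ := hq1
      simp only at hq2
      have hcnat : ((PySem.List.pyGetD VS i []).flatMap
          (fun v => (pvIncidence VS).getD v [])).count k = 2 := by exact_mod_cast hq2
      rw [hcountL] at hcnat
      by_cases hjr : k ∈ PySem.List.pyRange 0 (PySem.List.len faces)
      · rcases PySem.List.mem_pyRange_one.mp hjr with ⟨hj0, hj1⟩
        refine ⟨⟨h0, h1⟩, ⟨hj0, hj1⟩, ?_⟩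
        unfold pvInterLen
        simp only [PySem.Set.len]
        rw [← hfil]
        rw [if_pos hjr] at hcnat
        exact_mod_cast hcnat
      · rw [if_neg hjr] at hcnat
        cases hcnat
    · rintro ⟨-, ⟨hj0, hj1⟩, hint⟩
      have hjr : j ∈ PySem.List.pyRange 0 (PySem.List.len faces) :=
        PySem.List.mem_pyRange_one.mpr ⟨hj0, hj1⟩
      have hlen2 : ((PySem.List.pyGetD VS i []).filter
          (fun v => decide (v ∈ PySem.List.pyGetD VS j ([] : List Int)))).length = 2 := by
        rw [hfil]
        unfold pvInterLen at hint
        simp only [PySem.Set.len] at hint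
        exact_mod_cast hint
      have hcnat : ((PySem.List.pyGetD VS i []).flatMap
          (fun v => (pvIncidence VS).getD v [])).count j = 2 := by
        rw [hcountL, if_pos hjr]; exact hlen2
      refine List.mem_map.mpr ⟨(j, ((2 : Nat) : Int)), List.mem_filter.mpr ⟨?_, by simp⟩, rfl⟩
      refine List.mem_map.mpr ⟨j, (PySem.Set.mem_ofList _ _).mpr ?_, by rw [hcnat]⟩
      exact List.count_pos_iff.mp (by omega)
  · rw [if_neg hi]
    rw [PySem.List.mem_pyRange_one] at hi
    constructor
    · intro h; cases h
    · rintro ⟨⟨hh0, hh1⟩, -, -⟩; exact absurd ⟨hh0, hh1⟩ hi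

theorem pv_mem_stepA (adj : PySem.Dict Int (PySem.Set Int)) (l : List Int)
    (acc : PySem.Set Int) (x : Int) :
    x ∈ l.foldl (fun acc j => PySem.Set.union acc (adj.getD j PySem.Set.empty)) acc ↔
      x ∈ acc ∨ ∃ j ∈ l, x ∈ adj.getD j PySem.Set.empty := by
  induction l generalizing acc with
  | nil => simp
  | cons a tl ih =>
    rw [List.foldl_cons, ih]
    simp [PySem.Set.mem_union]
    tauto

theorem pv_nodup_stepA (adj : PySem.Dict Int (PySem.Set Int)) (l : List Int)
    (acc : PySem.Set Int) (h : acc.Nodup) :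
    (l.foldl (fun acc j => PySem.Set.union acc (adj.getD j PySem.Set.empty)) acc).Nodup := by
  induction l generalizing acc with
  | nil => exact h
  | cons a tl ih => exact ih _ (PySem.Set.nodup_union _ _ h)

theorem pv_length_le_of_sub (l₁ l₂ : List Int) (h1 : l₁.Nodup)
    (hsub : ∀ x ∈ l₁, x ∈ l₂) : l₁.length ≤ l₂.length := by
  calc l₁.length = l₁.toFinset.card := (List.toFinset_card_of_nodup h1).symm
    _ ≤ l₂.toFinset.card := Finset.card_le_card (fun x hx => by
        simp only [List.mem_toFinset] at *; exact hsub x hx)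
    _ ≤ l₂.length := List.toFinset_card_le l₂

theorem pv_length_lt_of_ssub (l₁ l₂ : List Int) (h1 : l₁.Nodup) (h2 : l₂.Nodup)
    (hsub : ∀ x ∈ l₁, x ∈ l₂) (w : Int) (hw : w ∈ l₂) (hw' : w ∉ l₁) :
    l₁.length < l₂.length := by
  rw [← List.toFinset_card_of_nodup h1, ← List.toFinset_card_of_nodup h2]
  apply Finset.card_lt_card
  constructor
  · intro x hx; simp only [List.mem_toFinset] at *; exact hsub x hx
  · intro hcon
    exact hw' (by simpa using hcon (by simpa using hw))

theorem pv_loopA_mono (adj : PySem.Dict Int (PySem.Set Int)) (fuel : List Int)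
    (cc : PySem.Set Int) (x : Int) (hx : x ∈ cc) : x ∈ pvLoopA adj fuel cc := by
  induction fuel generalizing cc with
  | nil => exact hx
  | cons a rest ih =>
    rw [pvLoopA]
    split
    · exact hx
    · exact ih _ ((pv_mem_stepA adj cc cc x).mpr (Or.inl hx))

theorem pv_loopA_nodup (adj : PySem.Dict Int (PySem.Set Int)) (fuel : List Int)
    (cc : PySem.Set Int) (h : cc.Nodup) : (pvLoopA adj fuel cc).Nodup := by
  induction fuel generalizing cc with
  | nil => exact h
  | cons a rest ih =>
    rw [pvLoopA]
    split
    · exact h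
    · exact ih _ (pv_nodup_stepA adj cc cc h)

theorem pv_loopA_sound (adj : PySem.Dict Int (PySem.Set Int)) (R : Int → Prop)
    (hR : ∀ j x, x ∈ adj.getD j PySem.Set.empty → R j → R x)
    (fuel : List Int) (cc : PySem.Set Int) (hcc : ∀ y ∈ cc, R y) :
    ∀ z ∈ pvLoopA adj fuel cc, R z := by
  induction fuel generalizing cc with
  | nil => exact hcc
  | cons a rest ih =>
    intro z hz
    rw [pvLoopA] at hz
    split at hz
    · exact hcc z hz
    · refine ih _ (fun y hy => ?_) z hz
      rcases (pv_mem_stepA adj cc cc y).mp hy with h | ⟨j, hj, hyj⟩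
      · exact hcc y h
      · exact hR j y hyj (hcc j hj)

theorem pv_loopA_closed (adj : PySem.Dict Int (PySem.Set Int)) (n : Int)
    (hadjr : ∀ j x, x ∈ adj.getD j PySem.Set.empty → 0 ≤ x ∧ x < n)
    (fuel : List Int) (cc : PySem.Set Int) (hnd : cc.Nodup)
    (hr : ∀ x ∈ cc, 0 ≤ x ∧ x < n)
    (hb : n.toNat < cc.length + fuel.length) :
    ∀ a ∈ pvLoopA adj fuel cc, ∀ b, b ∈ adj.getD a PySem.Set.empty →
      b ∈ pvLoopA adj fuel cc := by
  induction fuel generalizing cc with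
  | nil =>
    exfalso
    have hsub : ∀ x ∈ cc, x ∈ PySem.List.pyRange 0 n := by
      intro x hx
      rcases hr x hx with ⟨h0, h1⟩
      exact PySem.List.mem_pyRange_one.mpr ⟨h0, h1⟩
    have := pv_length_le_of_sub cc (PySem.List.pyRange 0 n) hnd hsub
    rw [PySem.List.length_pyRange_one] at this
    simp at hb
    omega
  | cons a rest ih =>
    intro u hu b hb'
    have hstep := pv_mem_stepA adj cc cc
    rw [pvLoopA] at hu ⊢
    by_cases heq : PySem.Set.equal
        (cc.foldl (fun acc j => PySem.Set.union acc (adj.getD j PySem.Set.empty)) cc) cc = true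
    · rw [if_pos heq] at hu ⊢
      have hiff := (PySem.Set.equal_iff _ _).mp heq
      exact (hiff b).mp ((hstep b).mpr (Or.inr ⟨u, hu, hb'⟩))
    · rw [if_neg heq] at hu ⊢
      have hnd' := pv_nodup_stepA adj cc cc hnd
      have hsub : ∀ x ∈ cc,
          x ∈ cc.foldl (fun acc j => PySem.Set.union acc (adj.getD j PySem.Set.empty)) cc :=
        fun x hx => (hstep x).mpr (Or.inl hx)
      refine ih _ hnd' (fun x hx => ?_) ?_ u hu b hb'
      · rcases (hstep x).mp hx with h | ⟨j, hj, hx'⟩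
        exacts [hr x h, hadjr j x hx']
      · have hnall : ¬ ∀ x, x ∈ cc.foldl
            (fun acc j => PySem.Set.union acc (adj.getD j PySem.Set.empty)) cc ↔ x ∈ cc :=
          fun hall => heq ((PySem.Set.equal_iff _ _).mpr hall)
        obtain ⟨w, hw⟩ := not_forall.mp hnall
        have hwin : w ∈ cc.foldl
            (fun acc j => PySem.Set.union acc (adj.getD j PySem.Set.empty)) cc ∧ w ∉ cc := by
          by_cases h1 : w ∈ cc
          · exact absurd (iff_of_true (hsub w h1) h1) hw
          · by_cases h2 : w ∈ cc.foldl
                (fun acc j => PySem.Set.union acc (adj.getD j PySem.Set.empty)) cc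
            · exact ⟨h2, h1⟩
            · exact absurd (iff_of_false h2 h1) hw
        have hlt := pv_length_lt_of_ssub cc _ hnd hnd' hsub w hwin.1 hwin.2
        simp only [List.length_cons] at hb
        omega

theorem pv_ccA_iff (faces : List (List Int)) (z : Int) :
    z ∈ pvLoopA (pvAdjA faces) (PySem.List.pyRange 0 (PySem.List.len faces))
        (PySem.Set.ofList [0]) ↔ pvReach faces z := by
  have hcc0 : (PySem.Set.ofList [(0 : Int)]) = [0] := rfl
  constructor
  · intro hz
    refine pv_loopA_sound (pvAdjA faces) (pvReach faces) (fun j x hx hj => ?_) _ _ ?_ z hz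
    · exact Relation.ReflTransGen.tail hj ((pv_mem_adjA faces j x).mp hx)
    · intro y hy
      rw [hcc0, List.mem_singleton] at hy
      subst hy
      exact Relation.ReflTransGen.refl
  · intro hz
    induction hz with
    | refl => exact pv_loopA_mono _ _ _ 0 (by rw [hcc0]; exact List.mem_singleton.mpr rfl)
    | tail hab hedge ih =>
      rename_i a b
      by_cases hn : 0 < PySem.List.len faces
      · refine pv_loopA_closed (pvAdjA faces) (PySem.List.len faces)
          (fun j x hx => ?_) _ _ (by rw [hcc0]; exact List.nodup_singleton 0)
          (fun x hx => ?_) ?_ a ih b ((pv_mem_adjA faces a b).mpr hedge)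
        · exact ((pv_mem_adjA faces j x).mp hx).2.1
        · rw [hcc0, List.mem_singleton] at hx
          subst hx
          exact ⟨le_refl 0, hn⟩
        · rw [hcc0]
          simp [PySem.List.length_pyRange_one]
      · exact absurd hedge (fun h => by have h1 := h.1.1; have h2 := h.1.2; omega)

theorem pv_dfs_superset (adj : PySem.Dict Int (List Int)) (U : List Int)
    (hadj : ∀ v x, x ∈ adj.getD v [] → x ∈ U)
    (visited : PySem.Set Int) (stack : List Int) (hs : ∀ x ∈ stack, x ∈ U)
    (x : Int) (hx : x ∈ visited ∨ x ∈ stack) :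
    x ∈ pvDfs adj U hadj visited stack hs := by
  fun_induction pvDfs with
  | case1 => simpa using hx
  | case2 visited v rest hs1 hv hs2 ih =>
    refine ih ?_
    rcases hx with h | h
    · exact Or.inl h
    · rcases List.mem_cons.mp h with rfl | h'
      · exact Or.inl ((PySem.Set.contains_iff _ _).mp hv)
      · exact Or.inr h'
  | case3 visited v rest hs1 hv hs2 ih =>
    refine ih ?_
    rcases hx with h | h
    · exact Or.inl ((PySem.Set.mem_add _ _ _).mpr (Or.inl h))
    · rcases List.mem_cons.mp h with rfl | h'
      · exact Or.inl ((PySem.Set.mem_add _ _ _).mpr (Or.inr rfl))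
      · exact Or.inr (List.mem_append.mpr (Or.inr h'))

theorem pv_dfs_nodup (adj : PySem.Dict Int (List Int)) (U : List Int)
    (hadj : ∀ v x, x ∈ adj.getD v [] → x ∈ U)
    (visited : PySem.Set Int) (stack : List Int) (hs : ∀ x ∈ stack, x ∈ U)
    (h : visited.Nodup) : (pvDfs adj U hadj visited stack hs).Nodup := by
  fun_induction pvDfs with
  | case1 => exact h
  | case2 visited v rest hs1 hv hs2 ih => exact ih h
  | case3 visited v rest hs1 hv hs2 ih => exact ih (PySem.Set.nodup_add _ _ h)

theorem pv_dfs_sound (adj : PySem.Dict Int (List Int)) (U : List Int)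
    (hadj : ∀ v x, x ∈ adj.getD v [] → x ∈ U)
    (R : Int → Prop) (hR : ∀ v x, x ∈ adj.getD v [] → R v → R x)
    (visited : PySem.Set Int) (stack : List Int) (hs : ∀ x ∈ stack, x ∈ U)
    (hv : ∀ y ∈ visited, R y) (hst : ∀ y ∈ stack, R y) :
    ∀ z ∈ pvDfs adj U hadj visited stack hs, R z := by
  fun_induction pvDfs with
  | case1 => exact hv
  | case2 visited v rest hs1 hc hs2 ih =>
    exact ih hv (fun y hy => hst y (List.mem_cons_of_mem _ hy))
  | case3 visited v rest hs1 hc hs2 ih =>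
    have hRv : R v := hst v List.mem_cons_self
    refine ih (fun y hy => ?_) (fun y hy => ?_)
    · rcases (PySem.Set.mem_add _ _ _).mp hy with h | rfl
      exacts [hv y h, hRv]
    · rcases List.mem_append.mp hy with h | h
      exacts [hR v y h hRv, hst y (List.mem_cons_of_mem _ h)]

theorem pv_dfs_closed (adj : PySem.Dict Int (List Int)) (U : List Int)
    (hadj : ∀ v x, x ∈ adj.getD v [] → x ∈ U)
    (visited : PySem.Set Int) (stack : List Int) (hs : ∀ x ∈ stack, x ∈ U)
    (hinv : ∀ u ∈ visited, ∀ w ∈ adj.getD u [], w ∈ visited ∨ w ∈ stack) :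
    ∀ u ∈ pvDfs adj U hadj visited stack hs, ∀ w ∈ adj.getD u [],
      w ∈ pvDfs adj U hadj visited stack hs := by
  fun_induction pvDfs with
  | case1 =>
    intro u hu w hw
    rcases hinv u hu w hw with h | h
    · exact h
    · cases h
  | case2 visited v rest hs1 hc hs2 ih =>
    refine ih (fun u hu w hw => ?_)
    rcases hinv u hu w hw with h | h
    · exact Or.inl h
    · rcases List.mem_cons.mp h with rfl | h'
      · exact Or.inl ((PySem.Set.contains_iff _ _).mp hc)
      · exact Or.inr h'
  | case3 visited v rest hs1 hc hs2 ih =>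
    refine ih (fun u hu w hw => ?_)
    rcases (PySem.Set.mem_add _ _ _).mp hu with h | rfl
    · rcases hinv u h w hw with h' | h'
      · exact Or.inl ((PySem.Set.mem_add _ _ _).mpr (Or.inl h'))
      · rcases List.mem_cons.mp h' with rfl | h''
        · exact Or.inl ((PySem.Set.mem_add _ _ _).mpr (Or.inr rfl))
        · exact Or.inr (List.mem_append.mpr (Or.inr h''))
    · exact Or.inr (List.mem_append.mpr (Or.inl hw))

theorem pv_visB_iff (faces : List (List Int)) (z : Int)
    (hadj : ∀ v x, x ∈ (pvAdjB (faces.map (fun f => PySem.Set.ofList f))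
        (pvIncidence (faces.map (fun f => PySem.Set.ofList f)))).getD v [] →
        x ∈ 0 :: (pvAdjB (faces.map (fun f => PySem.Set.ofList f))
          (pvIncidence (faces.map (fun f => PySem.Set.ofList f)))).values.flatten)
    (hs : ∀ x ∈ [(0 : Int)], x ∈ 0 :: (pvAdjB (faces.map (fun f => PySem.Set.ofList f))
          (pvIncidence (faces.map (fun f => PySem.Set.ofList f)))).values.flatten) :
    z ∈ pvDfs (pvAdjB (faces.map (fun f => PySem.Set.ofList f))
          (pvIncidence (faces.map (fun f => PySem.Set.ofList f))))
        (0 :: (pvAdjB (faces.map (fun f => PySem.Set.ofList f))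
          (pvIncidence (faces.map (fun f => PySem.Set.ofList f)))).values.flatten)
        hadj PySem.Set.empty [0] hs ↔ pvReach faces z := by
  constructor
  · intro hz
    refine pv_dfs_sound _ _ hadj (pvReach faces)
      (fun v x hx hv => Relation.ReflTransGen.tail hv ((pv_mem_adjB faces v x).mp hx))
      _ _ hs (fun y hy => absurd hy (by simp [PySem.Set.empty])) (fun y hy => ?_) z hz
    rw [List.mem_singleton] at hy
    subst hy
    exact Relation.ReflTransGen.refl
  · intro hz
    induction hz with
    | refl => exact pv_dfs_superset _ _ hadj _ _ hs 0 (Or.inr (List.mem_singleton.mpr rfl))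
    | tail hab hedge ih =>
      rename_i a b
      exact pv_dfs_closed _ _ hadj _ _ hs
        (fun u hu => absurd hu (by simp [PySem.Set.empty]))
        a ih b ((pv_mem_adjB faces a b).mpr hedge)

-- ===== VERDICT (by name: the statement is the Claim_ definition above) =====
theorem IsCompound_spec : Claim_equal_IsCompound := by
  intro faces _
  unfold Spec_IsCompound
  simp only [IsCompound, IsCompound_alt]
  rw [decide_eq_decide]
  have hadjB : ∀ v x : Int, x ∈ (pvAdjB (faces.map (fun f => PySem.Set.ofList f))
      (pvIncidence (faces.map (fun f => PySem.Set.ofList f)))).getD v [] →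
      x ∈ 0 :: (pvAdjB (faces.map (fun f => PySem.Set.ofList f))
        (pvIncidence (faces.map (fun f => PySem.Set.ofList f)))).values.flatten :=
    fun v x hx => List.mem_cons_of_mem _ (pv_mem_values_flatten_of_getD _ v x hx)
  have hsB : ∀ x ∈ [(0 : Int)], x ∈ 0 :: (pvAdjB (faces.map (fun f => PySem.Set.ofList f))
      (pvIncidence (faces.map (fun f => PySem.Set.ofList f)))).values.flatten := by
    intro x hx; rw [List.mem_singleton] at hx; subst hx; exact List.mem_cons_self
  have hperm : (pvLoopA (pvAdjA faces) (PySem.List.pyRange 0 (PySem.List.len faces))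
      (PySem.Set.ofList [0])).Perm
      (pvDfs (pvAdjB (faces.map (fun f => PySem.Set.ofList f))
          (pvIncidence (faces.map (fun f => PySem.Set.ofList f))))
        (0 :: (pvAdjB (faces.map (fun f => PySem.Set.ofList f))
          (pvIncidence (faces.map (fun f => PySem.Set.ofList f)))).values.flatten)
        hadjB PySem.Set.empty [0] hsB) := by
    rw [List.perm_ext_iff_of_nodup
      (pv_loopA_nodup _ _ _ (PySem.Set.nodup_ofList [0]))
      (pv_dfs_nodup _ _ hadjB _ _ hsB (by simp [PySem.Set.empty]))]
    intro z
    rw [pv_ccA_iff faces z, pv_visB_iff faces z hadjB hsB]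
  have hlen := hperm.length_eq
  simp only [PySem.Set.len, hlen]
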